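-- pv_equiv track=rewrite | github.com/TheDrimo/Feu | feu06.py | stop_zigzag
-- ===== SOURCE A (Python) =====
-- def stop_zigzag(chemin):
-- 	chemin_plus_court = []
-- 	curseur = 0
-- 	while curseur < len(chemin) :
-- 		chemin_plus_court.append(chemin[curseur])
-- 		curseur += 1
-- 		for i in range(curseur, len(chemin)):
-- 			for (a,b) in [(0,-1), (1,0), (0,1), (-1,0)]:
-- 				x, y = chemin[curseur][0]+a, chemin[curseur][1]+b
-- 				if (chemin[i] == (x,y)) & (i - curseur > 2) :
-- 					chemin_plus_court.append(chemin[curseur])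
-- 					curseur = i
-- 	return chemin_plus_court
-- ===== SOURCE B (Python) =====
-- def stop_zigzag(chemin):
--     # Index each coordinate's occurrence positions (ascending); binary-search the
--     # next adjacent point at distance > 2 instead of rescanning the suffix.
--     n = len(chemin)
--     index = {}
--     for j in range(n):
--         p = chemin[j]
--         if p in index:
--             index[p].append(j)
--         else:
--             index[p] = [j]
--
--     def first_ge(lst, t):
--         lo, hi = 0, len(lst)
--         while lo < hi:
--             mid = (lo + hi) // 2
--             if lst[mid] >= t:
--                 hi = mid
--             else:
--                 lo = mid + 1
--         return lo
--
--     def next_jump(c):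
--         px, py = chemin[c]
--         best = None
--         for q in ((px, py - 1), (px + 1, py), (px, py + 1), (px - 1, py)):
--             lst = index.get(q)
--             if lst is not None:
--                 k = first_ge(lst, c + 3)
--                 if k < len(lst) and (best is None or lst[k] < best):
--                     best = lst[k]
--         return best
--
--     out = []
--     c = 0
--     while c < n:
--         out.append(chemin[c])
--         c += 1
--         if c < n:
--             i = next_jump(c)
--             while i is not None:
--                 out.append(chemin[c])
--                 c = i
--                 i = next_jump(c)
--     return out
-- ===== Notes on version B (the rewrite author's own statement) =====
-- stated objective: faster
-- what changed: A rescans the whole path suffix (with a 4-way neighbour test per element) after every cursor step; B builds one dict mapping each coordinate to its sorted list of occurrence indices and finds the next qualifying jump target by binary-searching the four neighbour coordinates' index lists.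
import Mathlib
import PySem

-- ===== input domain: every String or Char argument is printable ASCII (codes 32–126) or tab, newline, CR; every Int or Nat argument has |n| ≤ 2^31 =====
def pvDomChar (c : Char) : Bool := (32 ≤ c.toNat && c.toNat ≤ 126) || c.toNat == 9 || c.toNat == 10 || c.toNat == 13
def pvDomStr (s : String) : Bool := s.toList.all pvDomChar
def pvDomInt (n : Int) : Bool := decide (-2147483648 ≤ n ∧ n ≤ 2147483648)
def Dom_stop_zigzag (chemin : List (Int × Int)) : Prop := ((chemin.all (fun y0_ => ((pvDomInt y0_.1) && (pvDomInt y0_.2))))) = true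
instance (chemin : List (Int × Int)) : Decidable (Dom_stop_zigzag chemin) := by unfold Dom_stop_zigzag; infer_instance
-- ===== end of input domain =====

-- B replaces A's quadratic rescans of the path suffix by a dict indexing each coordinate's
-- occurrence positions plus a hand-written binary search for the next qualifying index (measured faster).

-- ===== PORT A =====
-- inner `for (a,b) in [(0,-1),(1,0),(0,1),(-1,0)]` body of A, acting on the state (chemin_plus_court, curseur)
def pvInnerA (chemin : List (Int × Int)) (i : Nat) (st : List (Int × Int) × Nat) : List (Int × Int) × Nat :=
  [((0 : Int), (-1 : Int)), (1, 0), (0, 1), (-1, 0)].foldl (fun st ab =>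
    let p := chemin.getD st.2 (0, 0)
    let x := p.1 + ab.1
    let y := p.2 + ab.2
    if chemin.getD i (0, 0) = (x, y) ∧ (i : Int) - (st.2 : Int) > 2 then
      (st.1 ++ [chemin.getD st.2 (0, 0)], i)
    else st) st

-- the `for i in range(curseur, len(chemin))` loop of A
def pvForA (chemin : List (Int × Int)) (st : List (Int × Int) × Nat) : List (Int × Int) × Nat :=
  (List.range' st.2 (chemin.length - st.2)).foldl (fun st i => pvInnerA chemin i st) st

-- the `while curseur < len(chemin)` loop of A (fuel only makes the recursion structural;
-- the cursor strictly increases each iteration, so fuel = len(chemin) is never exhausted)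
def pvWhileA (chemin : List (Int × Int)) :
    Nat → List (Int × Int) → Nat → List (Int × Int)
  | 0, acc, _ => acc
  | fuel + 1, acc, c =>
    if c < chemin.length then
      let st := pvForA chemin (acc ++ [chemin.getD c (0, 0)], c + 1)
      pvWhileA chemin fuel st.1 st.2
    else acc

def stop_zigzag (chemin : List (Int × Int)) : List (Int × Int) :=
  pvWhileA chemin chemin.length [] 0

-- ===== PORT B =====
-- `for j in range(n): … index[p].append(j) / index[p] = [j]`
def pvBuildIdx (chemin : List (Int × Int)) : PySem.Dict (Int × Int) (List Nat) :=
  (List.range chemin.length).foldl (fun d j =>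
    let p := chemin.getD j (0, 0)
    if d.contains p then d.insert p (d.getD p [] ++ [j]) else d.insert p [j]) PySem.Dict.empty

-- hand-written binary search `first_ge` of Source B (returns first position with lst[pos] >= t;
-- fuel only makes the recursion structural: the interval halves, so fuel = len(lst) suffices)
def pvFirstGe (lst : List Nat) (t : Nat) : Nat → Nat → Nat → Nat
  | 0, lo, _ => lo
  | fuel + 1, lo, hi =>
    if lo < hi then
      let mid := (lo + hi) / 2
      if t ≤ lst.getD mid 0 then pvFirstGe lst t fuel lo mid
      else pvFirstGe lst t fuel (mid + 1) hi
    else lo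

-- `next_jump` of Source B
def pvNextJump (chemin : List (Int × Int)) (idx : PySem.Dict (Int × Int) (List Nat)) (c : Nat) :
    Option Nat :=
  let p := chemin.getD c (0, 0)
  [(p.1, p.2 - 1), (p.1 + 1, p.2), (p.1, p.2 + 1), (p.1 - 1, p.2)].foldl (fun best q =>
    match idx.get? q with
    | none => best
    | some lst =>
      let k := pvFirstGe lst (c + 3) lst.length 0 lst.length
      if k < lst.length then
        match best with
        | none => some (lst.getD k 0)
        | some b => if lst.getD k 0 < b then some (lst.getD k 0) else best
      else best) none

-- `while i is not None: …` of Source B (fuel only makes the recursion structural; it is never exhausted)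
def pvChainB (chemin : List (Int × Int)) (idx : PySem.Dict (Int × Int) (List Nat)) :
    Nat → List (Int × Int) → Nat → Option Nat → List (Int × Int) × Nat
  | 0, acc, c, _ => (acc, c)
  | fuel + 1, acc, c, i? =>
    match i? with
    | none => (acc, c)
    | some i =>
      pvChainB chemin idx fuel (acc ++ [chemin.getD c (0, 0)]) i (pvNextJump chemin idx i)

-- `while c < n: …` of Source B (fuel n suffices: c strictly increases)
def pvOuterB (chemin : List (Int × Int)) (idx : PySem.Dict (Int × Int) (List Nat)) :
    Nat → List (Int × Int) → Nat → List (Int × Int)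
  | 0, acc, _ => acc
  | fuel + 1, acc, c =>
    if c < chemin.length then
      let acc1 := acc ++ [chemin.getD c (0, 0)]
      let c1 := c + 1
      if c1 < chemin.length then
        let st := pvChainB chemin idx chemin.length acc1 c1 (pvNextJump chemin idx c1)
        pvOuterB chemin idx fuel st.1 st.2
      else pvOuterB chemin idx fuel acc1 c1
    else acc

def stop_zigzag_alt (chemin : List (Int × Int)) : List (Int × Int) :=
  pvOuterB chemin (pvBuildIdx chemin) chemin.length [] 0

-- ===== PRECONDITION & SPEC =====
def Spec_stop_zigzag (chemin : List (Int × Int)) (out : List (Int × Int)) : Prop := out = stop_zigzag_alt chemin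
instance (chemin : List (Int × Int)) (out : List (Int × Int)) : Decidable (Spec_stop_zigzag chemin out) := by unfold Spec_stop_zigzag; infer_instance

-- ===== CLAIM (what is proved, stated in full; the proofs are below) =====
def Claim_equal_stop_zigzag : Prop := ∀ (chemin : List (Int × Int)), Dom_stop_zigzag chemin → Spec_stop_zigzag chemin (stop_zigzag chemin)


-- ===== LEMMAS AND PROOFS =====

-- -------- spec layer: the "next qualifying index" function both loops compute --------
def pvNbrs (p : Int × Int) : List (Int × Int) :=
  [(p.1, p.2 - 1), (p.1 + 1, p.2), (p.1, p.2 + 1), (p.1 - 1, p.2)]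

def pvQual (chemin : List (Int × Int)) (c i : Nat) : Bool :=
  decide (chemin.getD i (0, 0) ∈ pvNbrs (chemin.getD c (0, 0)))

def pvFindFrom (chemin : List (Int × Int)) (c j : Nat) : Option Nat :=
  (List.range' j (chemin.length - j)).find? (fun i => decide (c + 3 ≤ i) && pvQual chemin c i)

theorem pvFindFrom_some {chemin : List (Int × Int)} {c j i : Nat}
    (h : pvFindFrom chemin c j = some i) :
    j ≤ i ∧ i < chemin.length ∧ c + 3 ≤ i ∧ pvQual chemin c i = true := by
  unfold pvFindFrom at h
  have hm := List.mem_of_find?_eq_some h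
  have hp := List.find?_some h
  rw [List.mem_range'_1] at hm
  simp only [Bool.and_eq_true, decide_eq_true_eq] at hp
  exact ⟨hm.1, by omega, hp.1, hp.2⟩

theorem pvFindFrom_none_of_le {chemin : List (Int × Int)} {c j : Nat}
    (h : chemin.length ≤ j) : pvFindFrom chemin c j = none := by
  simp [pvFindFrom, Nat.sub_eq_zero_of_le h]

-- the jump chain both programs run, written with structural fuel
def pvChainAux (chemin : List (Int × Int)) :
    Nat → List (Int × Int) → Nat → Nat → List (Int × Int) × Nat
  | 0, acc, c, _ => (acc, c)
  | m + 1, acc, c, j =>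
    match pvFindFrom chemin c j with
    | none => (acc, c)
    | some i => pvChainAux chemin m (acc ++ [chemin.getD c (0, 0)]) i (i + 1)

theorem pvChainAux_fuel (chemin : List (Int × Int)) :
    ∀ (m m' : Nat) (acc : List (Int × Int)) (c j : Nat),
      chemin.length - j ≤ m → chemin.length - j ≤ m' →
      pvChainAux chemin m acc c j = pvChainAux chemin m' acc c j := by
  intro m
  induction m with
  | zero =>
    intro m' acc c j hm hm'
    have hnone : pvFindFrom chemin c j = none := pvFindFrom_none_of_le (by omega)
    cases m' with
    | zero => rfl
    | succ m' => rw [pvChainAux, pvChainAux, hnone]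
  | succ m ih =>
    intro m' acc c j hm hm'
    cases m' with
    | zero =>
      have hnone : pvFindFrom chemin c j = none := pvFindFrom_none_of_le (by omega)
      rw [pvChainAux, pvChainAux, hnone]
    | succ m' =>
      rw [pvChainAux, pvChainAux]
      cases hf : pvFindFrom chemin c j with
      | none => rfl
      | some i =>
        have hb := pvFindFrom_some hf
        exact ih m' (acc ++ [chemin.getD c (0, 0)]) i (i + 1) (by omega) (by omega)

theorem pvChainAux_stop {chemin : List (Int × Int)} {j : Nat}
    (h : chemin.length ≤ j) (m : Nat) (acc : List (Int × Int)) (c : Nat) :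
    pvChainAux chemin m acc c j = (acc, c) := by
  cases m with
  | zero => rfl
  | succ m => rw [pvChainAux, pvFindFrom_none_of_le h]

theorem pvFindFrom_low (chemin : List (Int × Int)) (c : Nat) :
    ∀ (d j : Nat), j + d = c + 3 → pvFindFrom chemin c j = pvFindFrom chemin c (c + 3) := by
  intro d
  induction d with
  | zero => intro j hj; rw [show j = c + 3 by omega]
  | succ d ih =>
    intro j hj
    by_cases hjn : j < chemin.length
    · have hsplit : chemin.length - j = (chemin.length - (j + 1)) + 1 := by omega
      rw [pvFindFrom, hsplit, List.range'_succ, List.find?_cons_of_neg (by simp; omega)]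
      exact ih (j + 1) (by omega)
    · rw [pvFindFrom_none_of_le (by omega), pvFindFrom_none_of_le (by omega)]

theorem pvChainAux_low {chemin : List (Int × Int)} {c j : Nat} (h : j ≤ c + 3)
    (m : Nat) (acc : List (Int × Int)) :
    pvChainAux chemin m acc c j = pvChainAux chemin m acc c (c + 3) := by
  cases m with
  | zero => rfl
  | succ m => rw [pvChainAux, pvChainAux, pvFindFrom_low chemin c (c + 3 - j) j (by omega)]

-- the common reference loop (same fuel discipline as the two ports)
def pvRef (chemin : List (Int × Int)) :
    Nat → List (Int × Int) → Nat → List (Int × Int)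
  | 0, acc, _ => acc
  | fuel + 1, acc, c =>
    if c < chemin.length then
      let st := pvChainAux chemin chemin.length (acc ++ [chemin.getD c (0, 0)]) (c + 1) (c + 1)
      pvRef chemin fuel st.1 st.2
    else acc

-- -------- A side --------
-- one offset step of A's innermost loop (proof-layer name for the lambda in pvInnerA)
def pvStepA (chemin : List (Int × Int)) (i : Nat) (st : List (Int × Int) × Nat)
    (ab : Int × Int) : List (Int × Int) × Nat :=
  let p := chemin.getD st.2 (0, 0)
  let x := p.1 + ab.1
  let y := p.2 + ab.2
  if chemin.getD i (0, 0) = (x, y) ∧ (i : Int) - (st.2 : Int) > 2 then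
    (st.1 ++ [chemin.getD st.2 (0, 0)], i)
  else st

theorem pvInnerA_steps (chemin : List (Int × Int)) (i : Nat) (st : List (Int × Int) × Nat) :
    pvInnerA chemin i st =
      pvStepA chemin i (pvStepA chemin i (pvStepA chemin i (pvStepA chemin i st (0, -1)) (1, 0)) (0, 1)) (-1, 0) := rfl

theorem pvStepA_far {chemin : List (Int × Int)} {i : Nat} {acc : List (Int × Int)} {c : Nat}
    (h : ¬((i : Int) - (c : Int) > 2)) (ab : Int × Int) :
    pvStepA chemin i (acc, c) ab = (acc, c) := by
  simp only [pvStepA]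
  rw [if_neg (by tauto)]

theorem pvStepA_ne {chemin : List (Int × Int)} {i : Nat} {acc : List (Int × Int)} {c : Nat}
    {ab : Int × Int}
    (h : chemin.getD i (0, 0) ≠
      ((chemin.getD c (0, 0)).1 + ab.1, (chemin.getD c (0, 0)).2 + ab.2)) :
    pvStepA chemin i (acc, c) ab = (acc, c) := by
  simp only [pvStepA]
  rw [if_neg (by tauto)]

theorem pvStepA_hit {chemin : List (Int × Int)} {i : Nat} {acc : List (Int × Int)} {c : Nat}
    {ab : Int × Int}
    (h2 : (i : Int) - (c : Int) > 2)
    (heq : chemin.getD i (0, 0) =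
      ((chemin.getD c (0, 0)).1 + ab.1, (chemin.getD c (0, 0)).2 + ab.2)) :
    pvStepA chemin i (acc, c) ab = (acc ++ [chemin.getD c (0, 0)], i) := by
  simp only [pvStepA]
  rw [if_pos ⟨heq, h2⟩]

theorem pvInnerA_eq (chemin : List (Int × Int)) (i : Nat) (acc : List (Int × Int)) (c : Nat) :
    pvInnerA chemin i (acc, c) =
      if c + 3 ≤ i ∧ pvQual chemin c i then (acc ++ [chemin.getD c (0, 0)], i) else (acc, c) := by
  by_cases hd : c + 3 ≤ i
  · have h2 : (i : Int) - (c : Int) > 2 := by omega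
    by_cases hq : pvQual chemin c i = true
    · rw [if_pos ⟨hd, hq⟩]
      simp only [pvQual, pvNbrs, List.mem_cons, List.not_mem_nil, or_false,
        decide_eq_true_eq] at hq
      set p := chemin.getD c (0, 0) with hp
      have hp' : (chemin[c]?.getD ((0 : Int), (0 : Int))) = p := by
        rw [hp, List.getD_eq_getElem?_getD]
      have hfar : ¬((i : Int) - (i : Int) > 2) := by omega
      rcases hq with h1 | h2' | h3 | h4
      · rw [pvInnerA_steps,
          pvStepA_hit (ab := (0, -1)) h2 (by rw [h1]; simp [Prod.ext_iff, hp']; try omega),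
          pvStepA_far hfar (1, 0), pvStepA_far hfar (0, 1), pvStepA_far hfar (-1, 0)]
      · rw [pvInnerA_steps,
          pvStepA_ne (ab := (0, -1)) (by rw [h2']; simp [Prod.ext_iff, hp']; try omega),
          pvStepA_hit (ab := (1, 0)) h2 (by rw [h2']; simp [hp']; try omega),
          pvStepA_far hfar (0, 1), pvStepA_far hfar (-1, 0)]
      · rw [pvInnerA_steps,
          pvStepA_ne (ab := (0, -1)) (by rw [h3]; simp [Prod.ext_iff, hp']; try omega),
          pvStepA_ne (ab := (1, 0)) (by rw [h3]; simp [Prod.ext_iff, hp']; try omega),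
          pvStepA_hit (ab := (0, 1)) h2 (by rw [h3]; simp [hp']; try omega),
          pvStepA_far hfar (-1, 0)]
      · rw [pvInnerA_steps,
          pvStepA_ne (ab := (0, -1)) (by rw [h4]; simp [Prod.ext_iff, hp']; try omega),
          pvStepA_ne (ab := (1, 0)) (by rw [h4]; simp [Prod.ext_iff, hp']; try omega),
          pvStepA_ne (ab := (0, 1)) (by rw [h4]; simp [Prod.ext_iff, hp']; try omega),
          pvStepA_hit (ab := (-1, 0)) h2 (by rw [h4]; simp [Prod.ext_iff, hp']; try omega)]
    · rw [if_neg (by tauto)]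
      simp only [pvQual, pvNbrs, List.mem_cons, List.not_mem_nil, or_false,
        decide_eq_true_eq, not_or] at hq
      obtain ⟨n1, n2, n3, n4⟩ := hq
      set p := chemin.getD c (0, 0) with hp
      have hp' : (chemin[c]?.getD ((0 : Int), (0 : Int))) = p := by
        rw [hp, List.getD_eq_getElem?_getD]
      rw [pvInnerA_steps,
        pvStepA_ne (ab := (0, -1)) (by intro hcon; apply n1; rw [hcon]; simp [Prod.ext_iff, hp']; try omega),
        pvStepA_ne (ab := (1, 0)) (by intro hcon; apply n2; rw [hcon]; simp [hp']; try omega),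
        pvStepA_ne (ab := (0, 1)) (by intro hcon; apply n3; rw [hcon]; simp [hp']; try omega),
        pvStepA_ne (ab := (-1, 0)) (by intro hcon; apply n4; rw [hcon]; simp [Prod.ext_iff, hp']; try omega)]
  · have h2 : ¬((i : Int) - (c : Int) > 2) := by omega
    rw [if_neg (by tauto), pvInnerA_steps, pvStepA_far h2 (0, -1), pvStepA_far h2 (1, 0),
      pvStepA_far h2 (0, 1), pvStepA_far h2 (-1, 0)]

theorem pvForA_eq (chemin : List (Int × Int)) :
    ∀ (m j : Nat) (acc : List (Int × Int)) (c : Nat),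
      chemin.length - j ≤ m → c ≤ j →
      (List.range' j (chemin.length - j)).foldl (fun st i => pvInnerA chemin i st) (acc, c) =
        pvChainAux chemin m acc c j := by
  intro m
  induction m with
  | zero =>
    intro j acc c hm hcj
    rw [Nat.sub_eq_zero_of_le (by omega)]
    rfl
  | succ m ih =>
    intro j acc c hm hcj
    by_cases hjn : j < chemin.length
    · have hsplit : chemin.length - j = (chemin.length - (j + 1)) + 1 := by omega
      rw [hsplit, List.range'_succ, List.foldl_cons, pvInnerA_eq]
      by_cases hfire : c + 3 ≤ j ∧ pvQual chemin c j
      · rw [if_pos hfire]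
        have hfind : pvFindFrom chemin c j = some j := by
          rw [pvFindFrom, hsplit, List.range'_succ]
          exact List.find?_cons_of_pos (by simp [hfire.1, hfire.2])
        rw [pvChainAux, hfind]
        exact ih (j + 1) (acc ++ [chemin.getD c (0, 0)]) j (by omega) (by omega)
      · rw [if_neg hfire]
        have hstep : pvFindFrom chemin c j = pvFindFrom chemin c (j + 1) := by
          rw [pvFindFrom, hsplit, List.range'_succ, List.find?_cons_of_neg
            (by simp only [Bool.and_eq_true, decide_eq_true_eq, not_and]; intro hle hq; exact hfire ⟨hle, hq⟩)]
          rfl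
        rw [pvChainAux, hstep]
        rw [ih (j + 1) acc c (by omega) (by omega),
          pvChainAux_fuel chemin m (m + 1) acc c (j + 1) (by omega) (by omega), pvChainAux]
    · rw [Nat.sub_eq_zero_of_le (by omega)]
      rw [pvChainAux, pvFindFrom_none_of_le (by omega)]
      rfl


-- -------- B side --------
def pvIdxList (chemin : List (Int × Int)) (q : Int × Int) : List Nat :=
  (List.range chemin.length).filter (fun j => decide (chemin.getD j (0, 0) = q))

theorem pvBuildIdx_getD (chemin : List (Int × Int)) (q : Int × Int) :
    (pvBuildIdx chemin).getD q [] = pvIdxList chemin q := by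
  suffices h : ∀ m, (((List.range m).foldl (fun d j =>
      let p := chemin.getD j (0, 0)
      if d.contains p then d.insert p (d.getD p [] ++ [j]) else d.insert p [j])
      PySem.Dict.empty)).getD q [] =
      (List.range m).filter (fun j => decide (chemin.getD j (0, 0) = q)) by
    exact h chemin.length
  intro m
  induction m with
  | zero => simp [PySem.Dict.getD_empty]
  | succ m ih =>
    rw [List.range_succ, List.foldl_append, List.filter_append]
    simp only [List.foldl_cons, List.foldl_nil]
    set d := (List.range m).foldl (fun d j =>
      let p := chemin.getD j (0, 0)
      if d.contains p then d.insert p (d.getD p [] ++ [j]) else d.insert p [j])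
      PySem.Dict.empty with hd
    by_cases hc : d.contains (chemin.getD m (0, 0)) = true
    · rw [if_pos hc, PySem.Dict.getD_insert]
      by_cases hqp : q = chemin.getD m (0, 0)
      · rw [if_pos hqp, ← hqp, ih]
        simp [hqp]
      · rw [if_neg hqp, ih]
        have hfm : (decide (chemin[m]?.getD ((0 : Int), (0 : Int)) = q)) = false := by
          rw [← List.getD_eq_getElem?_getD]
          simp; intro hcon; exact hqp hcon.symm
        simp [List.filter, hfm]
    · rw [if_neg hc, PySem.Dict.getD_insert]
      by_cases hqp : q = chemin.getD m (0, 0)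
      · rw [if_pos hqp]
        have hnil : d.getD q [] = [] := by
          rw [hqp]; exact PySem.Dict.getD_of_not_contains d [] (by simpa using hc)
        rw [← ih, hnil]
        simp [hqp]
      · rw [if_neg hqp, ih]
        have hfm : (decide (chemin[m]?.getD ((0 : Int), (0 : Int)) = q)) = false := by
          rw [← List.getD_eq_getElem?_getD]
          simp; intro hcon; exact hqp hcon.symm
        simp [List.filter, hfm]

theorem pvIdxList_pairwise (chemin : List (Int × Int)) (q : Int × Int) :
    (pvIdxList chemin q).Pairwise (· < ·) :=
  List.Pairwise.sublist List.filter_sublist List.pairwise_lt_range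

theorem pvIdxList_mem (chemin : List (Int × Int)) (q : Int × Int) (j : Nat) :
    j ∈ pvIdxList chemin q ↔ j < chemin.length ∧ chemin.getD j (0, 0) = q := by
  simp [pvIdxList, List.mem_filter, List.mem_range]

theorem pvIdxList_mono (chemin : List (Int × Int)) (q : Int × Int) :
    ∀ (a b : Nat) (ha : a < (pvIdxList chemin q).length) (hb : b < (pvIdxList chemin q).length),
      a ≤ b → (pvIdxList chemin q)[a] ≤ (pvIdxList chemin q)[b] := by
  intro a b ha hb hab
  rcases Nat.eq_or_lt_of_le hab with h | h
  · subst h; exact le_refl _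
  · exact le_of_lt (List.pairwise_iff_getElem.mp (pvIdxList_pairwise chemin q) a b ha hb h)

theorem pvFirstGe_unfold (lst : List Nat) (t m lo hi : Nat) :
    pvFirstGe lst t (m + 1) lo hi =
      if lo < hi then
        (if t ≤ lst.getD ((lo + hi) / 2) 0 then pvFirstGe lst t m lo ((lo + hi) / 2)
         else pvFirstGe lst t m ((lo + hi) / 2 + 1) hi)
      else lo := rfl

-- correctness of Source B's hand-written binary search on a monotone list
theorem pvFirstGe_spec (L : List Nat) (t : Nat)
    (hmono : ∀ (a b : Nat) (ha : a < L.length) (hb : b < L.length), a ≤ b → L[a] ≤ L[b]) :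
    ∀ (m lo hi : Nat), hi - lo ≤ m → lo ≤ hi → hi ≤ L.length →
      (∀ (k : Nat) (hk : k < L.length), k < lo → L[k] < t) →
      (∀ (k : Nat) (hk : k < L.length), hi ≤ k → t ≤ L[k]) →
      (pvFirstGe L t m lo hi ≤ L.length ∧
        (∀ (k : Nat) (hk : k < L.length), k < pvFirstGe L t m lo hi → L[k] < t) ∧
        (∀ (k : Nat) (hk : k < L.length), pvFirstGe L t m lo hi ≤ k → t ≤ L[k])) := by
  intro m
  induction m with
  | zero =>
    intro lo hi hm hlohi hhi hlow hhigh
    have : lo = hi := by omega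
    show pvFirstGe L t 0 lo hi ≤ L.length ∧ _
    rw [pvFirstGe]
    subst this
    exact ⟨by omega, hlow, fun k hk hge => hhigh k hk hge⟩
  | succ m ih =>
    intro lo hi hm hlohi hhi hlow hhigh
    rw [pvFirstGe_unfold]
    by_cases hlt : lo < hi
    · rw [if_pos hlt]
      have hmid1 : lo ≤ (lo + hi) / 2 := by omega
      have hmid2 : (lo + hi) / 2 < hi := by omega
      have hmlen : (lo + hi) / 2 < L.length := by omega
      rw [List.getD_eq_getElem L 0 hmlen]
      by_cases hcmp : t ≤ L[(lo + hi) / 2]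
      · rw [if_pos hcmp]
        exact ih lo ((lo + hi) / 2) (by omega) (by omega) (by omega) hlow
          (fun k hk hge => le_trans hcmp (hmono _ k hmlen hk hge))
      · rw [if_neg hcmp]
        exact ih ((lo + hi) / 2 + 1) hi (by omega) (by omega) hhi
          (fun k hk hklt => lt_of_le_of_lt (hmono k _ hk hmlen (by omega)) (by omega))
          hhigh
    · rw [if_neg hlt]
      have : lo = hi := by omega
      subst this
      exact ⟨by omega, hlow, fun k hk hge => hhigh k hk hge⟩

-- per-coordinate value accumulated by next_jump's loop
def pvFq (_chemin : List (Int × Int)) (idx : PySem.Dict (Int × Int) (List Nat)) (c : Nat)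
    (q : Int × Int) : Option Nat :=
  match idx.get? q with
  | none => none
  | some lst =>
    if pvFirstGe lst (c + 3) lst.length 0 lst.length < lst.length then
      some (lst.getD (pvFirstGe lst (c + 3) lst.length 0 lst.length) 0)
    else none

def pvOmin : Option Nat → Option Nat → Option Nat
  | none, b => b
  | some a, none => some a
  | some a, some b => some (min a b)

theorem pvOmin_assoc (a b c : Option Nat) :
    pvOmin (pvOmin a b) c = pvOmin a (pvOmin b c) := by
  cases a <;> cases b <;> cases c <;> simp [pvOmin, Nat.min_assoc]

theorem pvNextJump_step (chemin : List (Int × Int)) (idx : PySem.Dict (Int × Int) (List Nat))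
    (c : Nat) (best : Option Nat) (q : Int × Int) :
    (match idx.get? q with
      | none => best
      | some lst =>
        let k := pvFirstGe lst (c + 3) lst.length 0 lst.length
        if k < lst.length then
          match best with
          | none => some (lst.getD k 0)
          | some b => if lst.getD k 0 < b then some (lst.getD k 0) else best
        else best) = pvOmin best (pvFq chemin idx c q) := by
  cases hg : idx.get? q with
  | none => simp only [pvFq, hg]; cases best <;> rfl
  | some lst =>
    simp only [pvFq, hg]
    by_cases hk : pvFirstGe lst (c + 3) lst.length 0 lst.length < lst.length
    · rw [if_pos hk, if_pos hk]
      cases best with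
      | none => rfl
      | some b =>
        simp only [pvOmin]
        split_ifs with h
        · rw [Nat.min_comm, Nat.min_def, if_pos (by omega)]
        · rw [Nat.min_def]
          split_ifs with h2
          · rfl
          · exact (h2 (by omega)).elim
    · rw [if_neg hk, if_neg hk]
      cases best <;> rfl

theorem pvFq_eq (chemin : List (Int × Int)) (c : Nat) (q : Int × Int) :
    pvFq chemin (pvBuildIdx chemin) c q =
      (List.range' (c + 3) (chemin.length - (c + 3))).find?
        (fun i => decide (chemin.getD i (0, 0) = q)) := by
  have hgd := pvBuildIdx_getD chemin q
  rw [PySem.Dict.getD_eq_get?_getD] at hgd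
  cases hg : (pvBuildIdx chemin).get? q with
  | none =>
    rw [hg] at hgd
    simp only [Option.getD_none] at hgd
    rw [pvFq, hg]
    symm
    rw [List.find?_range'_eq_none]
    intro i hle hlt
    simp only [Bool.not_eq_eq_eq_not, Bool.not_true, decide_eq_false_iff_not]
    intro hcon
    have : i ∈ pvIdxList chemin q := (pvIdxList_mem chemin q i).mpr ⟨by omega, hcon⟩
    rw [← hgd] at this
    simp at this
  | some lst =>
    rw [hg] at hgd
    simp only [Option.getD_some] at hgd
    subst hgd
    set L := pvIdxList chemin q with hL
    obtain ⟨hk_le, hlow, hhigh⟩ := pvFirstGe_spec L (c + 3) (pvIdxList_mono chemin q)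
      L.length 0 L.length (by omega) (by omega) (le_refl _)
      (by intro k hk hk0; omega) (by intro k hk hge; omega)
    simp only [pvFq, hg]
    by_cases hk : pvFirstGe L (c + 3) L.length 0 L.length < L.length
    · rw [if_pos hk, List.getD_eq_getElem L 0 hk]
      have hmemL : L[pvFirstGe L (c + 3) L.length 0 L.length] ∈ L := List.getElem_mem hk
      have hmemL' : L[pvFirstGe L (c + 3) L.length 0 L.length] ∈ pvIdxList chemin q := by
        rw [← hL]; exact hmemL
      have hprops := (pvIdxList_mem chemin q _).mp hmemL'
      have hge3 : c + 3 ≤ L[pvFirstGe L (c + 3) L.length 0 L.length] := hhigh _ hk (le_refl _)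
      symm
      rw [List.find?_range'_eq_some]
      refine ⟨?_, List.mem_range'_1.mpr ⟨hge3, by omega⟩, ?_⟩
      · have h2 := hprops.2
        rw [List.getD_eq_getElem?_getD] at h2
        simp [h2]
      intro j hjle hjlt
      simp only [Bool.not_eq_eq_eq_not, Bool.not_true, decide_eq_false_iff_not]
      intro hcon
      have hjmem : j ∈ pvIdxList chemin q := (pvIdxList_mem chemin q j).mpr ⟨by omega, hcon⟩
      rw [← hL] at hjmem
      obtain ⟨pos, hpos, hposeq⟩ := List.mem_iff_getElem.mp hjmem
      by_cases hposk : pos < pvFirstGe L (c + 3) L.length 0 L.length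
      · have := hlow pos hpos hposk
        omega
      · have hle := pvIdxList_mono chemin q (pvFirstGe L (c + 3) L.length 0 L.length) pos
          (by rw [← hL]; exact hk) (by rw [← hL]; exact hpos) (by omega)
        simp only [← hL] at hle
        omega
    · rw [if_neg hk]
      symm
      rw [List.find?_range'_eq_none]
      intro i hle hlt
      simp only [Bool.not_eq_eq_eq_not, Bool.not_true, decide_eq_false_iff_not]
      intro hcon
      have hmem : i ∈ pvIdxList chemin q := (pvIdxList_mem chemin q i).mpr ⟨by omega, hcon⟩
      rw [← hL] at hmem
      obtain ⟨pos, hpos, hposeq⟩ := List.mem_iff_getElem.mp hmem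
      have := hlow pos hpos (by omega)
      omega

-- least element of a union of "first occurrence" searches, on a strictly increasing list
theorem pvFind?_or (p r : Nat → Bool) :
    ∀ (l : List Nat), l.Pairwise (· < ·) →
      l.find? (fun i => p i || r i) = pvOmin (l.find? p) (l.find? r) := by
  intro l
  induction l with
  | nil => intro _; rfl
  | cons a l ih =>
    intro hpw
    rw [List.pairwise_cons] at hpw
    by_cases hpa : p a = true
    · rw [List.find?_cons_of_pos (by simp [hpa]), List.find?_cons_of_pos hpa]
      by_cases hra : r a = true
      · rw [List.find?_cons_of_pos hra]
        simp [pvOmin]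
      · rw [List.find?_cons_of_neg (by simp [hra])]
        cases hfr : l.find? r with
        | none => rfl
        | some v =>
          have hv := List.mem_of_find?_eq_some hfr
          have := hpw.1 v hv
          simp only [pvOmin]
          rw [Nat.min_def, if_pos (by omega)]
    · by_cases hra : r a = true
      · rw [List.find?_cons_of_pos (by simp [hra]), List.find?_cons_of_neg (by simp [hpa]),
          List.find?_cons_of_pos hra]
        cases hfp : l.find? p with
        | none => rfl
        | some v =>
          have hv := List.mem_of_find?_eq_some hfp
          have := hpw.1 v hv
          simp only [pvOmin]
          rw [Nat.min_def, if_neg (by omega)]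
      · rw [List.find?_cons_of_neg (by simp [hpa, hra]), List.find?_cons_of_neg (by simp [hpa]),
          List.find?_cons_of_neg (by simp [hra])]
        exact ih hpw.2

theorem pvFind?_drop_bound (c : Nat) (g : Nat → Bool) :
    ∀ (l : List Nat), (∀ i ∈ l, c + 3 ≤ i) →
      l.find? (fun i => decide (c + 3 ≤ i) && g i) = l.find? g := by
  intro l
  induction l with
  | nil => intro _; rfl
  | cons a l ih =>
    intro hb
    have ha : decide (c + 3 ≤ a) = true := by simp [hb a (List.mem_cons_self ..)]
    by_cases hg : g a = true
    · rw [List.find?_cons_of_pos (by simp [ha, hg]), List.find?_cons_of_pos hg]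
    · rw [List.find?_cons_of_neg (by simp [ha, hg]), List.find?_cons_of_neg (by simp [hg])]
      exact ih (fun i hi => hb i (List.mem_cons_of_mem _ hi))

theorem pvNextJump_eq (chemin : List (Int × Int)) (c : Nat) :
    pvNextJump chemin (pvBuildIdx chemin) c = pvFindFrom chemin c (c + 3) := by
  set p := chemin.getD c (0, 0) with hp
  set R := List.range' (c + 3) (chemin.length - (c + 3)) with hR
  have hpwR : R.Pairwise (· < ·) := List.pairwise_lt_range' 1
  have hRb : ∀ i ∈ R, c + 3 ≤ i := by
    intro i hi; rw [hR, List.mem_range'_1] at hi; omega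
  have hqual : (fun i => decide (c + 3 ≤ i) && pvQual chemin c i) =
      (fun i => decide (c + 3 ≤ i) &&
        (decide (chemin.getD i (0, 0) = (p.1, p.2 - 1)) ||
          (decide (chemin.getD i (0, 0) = (p.1 + 1, p.2)) ||
            (decide (chemin.getD i (0, 0) = (p.1, p.2 + 1)) ||
              decide (chemin.getD i (0, 0) = (p.1 - 1, p.2)))))) := by
    funext i
    have hp' : (chemin[c]?.getD ((0 : Int), (0 : Int))) = p := by
      rw [hp, List.getD_eq_getElem?_getD]
    simp [pvQual, pvNbrs, List.mem_cons, hp']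
  rw [pvFindFrom, ← hR, hqual, pvFind?_drop_bound c _ R hRb,
    pvFind?_or _ _ R hpwR, pvFind?_or _ _ R hpwR, pvFind?_or _ _ R hpwR]
  rw [pvNextJump, ← hp]
  simp only [List.foldl_cons, List.foldl_nil]
  rw [pvNextJump_step chemin _ c, pvNextJump_step chemin _ c, pvNextJump_step chemin _ c,
    pvNextJump_step chemin _ c]
  rw [pvFq_eq chemin c, pvFq_eq chemin c, pvFq_eq chemin c, pvFq_eq chemin c, ← hR]
  show pvOmin (pvOmin (pvOmin (pvOmin none _) _) _) _ = _
  rw [show ∀ x, pvOmin none x = x from fun x => rfl,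
    pvOmin_assoc, pvOmin_assoc]

-- Source B's inner while loop computes the jump chain
theorem pvChainB_eq (chemin : List (Int × Int)) :
    ∀ (fuel : Nat) (acc : List (Int × Int)) (c : Nat),
      chemin.length ≤ c + 3 * fuel + 3 →
      pvChainB chemin (pvBuildIdx chemin) fuel acc c (pvNextJump chemin (pvBuildIdx chemin) c) =
        pvChainAux chemin fuel acc c (c + 3) := by
  intro fuel
  induction fuel with
  | zero =>
    intro acc c h
    rfl
  | succ fuel ih =>
    intro acc c h
    rw [pvNextJump_eq chemin c, pvChainAux]
    cases hf : pvFindFrom chemin c (c + 3) with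
    | none => rw [pvChainB]
    | some i =>
      have hb := pvFindFrom_some hf
      rw [pvChainB, ih (acc ++ [chemin.getD c (0, 0)]) i (by omega)]
      exact (pvChainAux_low (by omega) fuel (acc ++ [chemin.getD c (0, 0)])).symm

-- Source B's outer while loop follows the reference loop
theorem pvOuterB_eq (chemin : List (Int × Int)) :
    ∀ (fuel : Nat) (acc : List (Int × Int)) (c : Nat),
      pvOuterB chemin (pvBuildIdx chemin) fuel acc c = pvRef chemin fuel acc c := by
  intro fuel
  induction fuel with
  | zero => intro acc c; rfl
  | succ fuel ih =>
    intro acc c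
    by_cases hc : c < chemin.length
    · rw [pvOuterB, if_pos hc]
      rw [pvRef, if_pos hc]
      by_cases hc1 : c + 1 < chemin.length
      · simp only [if_pos hc1]
        have hchain : pvChainB chemin (pvBuildIdx chemin) chemin.length
            (acc ++ [chemin.getD c (0, 0)]) (c + 1)
            (pvNextJump chemin (pvBuildIdx chemin) (c + 1)) =
            pvChainAux chemin chemin.length (acc ++ [chemin.getD c (0, 0)]) (c + 1) (c + 1) := by
          rw [pvChainB_eq chemin chemin.length (acc ++ [chemin.getD c (0, 0)]) (c + 1) (by omega)]
          exact (pvChainAux_low (by omega) chemin.length (acc ++ [chemin.getD c (0, 0)])).symm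
        rw [hchain]
        exact ih _ _
      · simp only [if_neg hc1]
        rw [pvChainAux_stop (by omega)]
        exact ih (acc ++ [chemin.getD c (0, 0)]) (c + 1)
    · rw [pvOuterB, if_neg hc, pvRef, if_neg hc]

-- A's while loop follows the reference loop
theorem pvWhileA_eq (chemin : List (Int × Int)) :
    ∀ (fuel : Nat) (acc : List (Int × Int)) (c : Nat),
      pvWhileA chemin fuel acc c = pvRef chemin fuel acc c := by
  intro fuel
  induction fuel with
  | zero => intro acc c; rfl
  | succ fuel ih =>
    intro acc c
    by_cases hc : c < chemin.length
    · rw [pvWhileA, if_pos hc, pvRef, if_pos hc]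
      simp only
      have hfold : pvForA chemin (acc ++ [chemin.getD c (0, 0)], c + 1) =
          pvChainAux chemin chemin.length (acc ++ [chemin.getD c (0, 0)]) (c + 1) (c + 1) := by
        rw [pvForA]
        exact pvForA_eq chemin chemin.length (c + 1) (acc ++ [chemin.getD c (0, 0)]) (c + 1)
          (by omega) (le_refl _)
      rw [hfold]
      exact ih _ _
    · rw [pvWhileA, if_neg hc, pvRef, if_neg hc]

-- ===== VERDICT (by name: the statement is the Claim_ definition above) =====
theorem stop_zigzag_spec : Claim_equal_stop_zigzag := by
  intro chemin _
  unfold Spec_stop_zigzag stop_zigzag stop_zigzag_alt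
  rw [pvWhileA_eq chemin chemin.length [] 0, pvOuterB_eq chemin chemin.length [] 0]
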